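-- pv_equiv track=rewrite | github.com/posl/comment_recommendation | script/split_gen/2_time/zh/161_D/3.py | lllsk
-- ===== SOURCE A (Python) =====
-- def lllsk(K):
--     if K<10:
--         return K
--     else:
--         K-=10
--         a=1
--         while K>0:
--             a+=1
--             if a<10:
--                 K-=1
--             else:
--                 K-=2
--         if K==0:
--             return a
--         else:
--             return int(str(a)+str(a+1))
-- ===== SOURCE B (Python) =====
-- def lllsk(K):
--     # Closed form: invert the piecewise-linear decrement loop instead of iterating.
--     if K < 10:
--         return K
--     r = K - 18          # leftover after the eight unit decrements (a: 2..9)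
--     if r <= 0:
--         return K - 9    # loop ends with K==0 and a == K-9
--     if r % 2 == 0:
--         return 9 + r // 2
--     a = 9 + (r + 1) // 2
--     return int(str(a) + str(a + 1))
-- ===== Notes on version B (the rewrite author's own statement) =====
-- stated objective: faster
-- what changed: Replaced the O(K) counting while-loop with O(1) closed-form arithmetic inverting the piecewise-linear K->a decrement relation (unit steps while a<10, double steps after).
import Mathlib
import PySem

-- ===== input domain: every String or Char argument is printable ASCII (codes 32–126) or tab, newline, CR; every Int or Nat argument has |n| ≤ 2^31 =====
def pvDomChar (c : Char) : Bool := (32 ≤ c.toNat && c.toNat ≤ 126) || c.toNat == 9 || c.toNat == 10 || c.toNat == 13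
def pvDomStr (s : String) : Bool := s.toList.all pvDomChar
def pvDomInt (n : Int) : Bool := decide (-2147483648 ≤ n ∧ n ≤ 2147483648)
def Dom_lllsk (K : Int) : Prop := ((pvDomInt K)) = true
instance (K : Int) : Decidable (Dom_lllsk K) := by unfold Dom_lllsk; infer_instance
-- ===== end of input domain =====

-- B replaces A's O(K) counting loop by O(1) closed-form arithmetic; return values are identical.

-- ===== PORT A =====
-- the while loop: state (K, a); each iteration a+=1 then K-=1 if a<10 else K-=2
def lllskLoop (K a : Int) : Int × Int :=
  if h : 0 < K then
    lllskLoop (if a + 1 < 10 then K - 1 else K - 2) (a + 1)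
  else (K, a)
termination_by K.toNat
decreasing_by
  all_goals split <;> omega

-- `int(str(a)+str(a+1))`: ofStr? is exact for int(); it is always `some` here, `getD 0` only eliminates the Option
def lllsk (K : Int) : Int :=
  if K < 10 then K
  else
    let p := lllskLoop (K - 10) 1
    if p.1 = 0 then p.2
    else (PySem.Int.ofStr? (PySem.Int.toStr p.2 ++ PySem.Int.toStr (p.2 + 1))).getD 0

-- ===== PORT B =====
def lllsk_alt (K : Int) : Int :=
  if K < 10 then K
  else
    let r := K - 18
    if r ≤ 0 then K - 9
    else if r % 2 = 0 then 9 + r / 2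
    else
      let a := 9 + (r + 1) / 2
      (PySem.Int.ofStr? (PySem.Int.toStr a ++ PySem.Int.toStr (a + 1))).getD 0

-- ===== PRECONDITION & SPEC =====
def Spec_lllsk (K : Int) (out : Int) : Prop := out = lllsk_alt K
instance (K : Int) (out : Int) : Decidable (Spec_lllsk K out) := by unfold Spec_lllsk; infer_instance

-- ===== CLAIM (what is proved, stated in full; the proofs are below) =====
def Claim_equal_lllsk : Prop := ∀ (K : Int), Dom_lllsk K → Spec_lllsk K (lllsk K)

-- ===== LEMMAS AND PROOFS =====

-- phase 2: once a ≥ 9, every iteration subtracts 2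
theorem lllskLoop_phase2 (n : ℕ) : ∀ (K a : Int), K = (n : Int) + 1 → 9 ≤ a →
    lllskLoop K a = (if K % 2 = 0 then (0, a + K / 2) else (-1, a + (K + 1) / 2)) := by
  induction n using Nat.strong_induction_on with
  | _ n ih =>
    intro K a hK ha
    rw [lllskLoop]
    have h0 : 0 < K := by omega
    rw [dif_pos h0, if_neg (by omega)]
    rcases n with _ | n
    · rw [lllskLoop]; rw [dif_neg (by omega)]
      simp only [hK]; norm_num
    rcases n with _ | n
    · rw [lllskLoop]; rw [dif_neg (by omega)]
      simp only [hK]; norm_num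
    · have := ih n (by omega) (K - 2) (a + 1) (by omega) (by omega)
      rw [this]
      have h2 : (K - 2) % 2 = K % 2 := by omega
      rw [h2]
      split_ifs with hpar
      · have : (K - 2) / 2 = K / 2 - 1 := by omega
        rw [this]; ring_nf
      · have : (K - 2 + 1) / 2 = (K + 1) / 2 - 1 := by omega
        rw [this]; ring_nf

-- phase 1: from a with 1 ≤ a ≤ 9 and K > 0
theorem lllskLoop_phase1 (m : ℕ) : ∀ (K a : Int), a = 9 - (m : Int) → 1 ≤ a → 0 < K →
    lllskLoop K a =
      (if K ≤ 9 - a then (0, a + K)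
       else if (K - (9 - a)) % 2 = 0 then (0, 9 + (K - (9 - a)) / 2)
       else (-1, 9 + (K - (9 - a) + 1) / 2)) := by
  induction m with
  | zero =>
    intro K a h9 h1 hK
    have ha : a = 9 := by omega
    subst ha
    rw [lllskLoop_phase2 (K - 1).toNat K 9 (by omega) (by omega)]
    rw [show (9:Int) - 9 = 0 from by norm_num, sub_zero]
    rw [if_neg (show ¬ K ≤ 0 from by omega)]
  | succ m ih =>
    intro K a h9 h1 hK
    rw [lllskLoop, dif_pos hK, if_pos (by omega)]
    by_cases hK1 : K = 1
    · subst hK1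
      rw [lllskLoop]; rw [dif_neg (by omega)]
      rw [if_pos (show (1:Int) ≤ 9 - a from by omega)]
      norm_num
    · have := ih (K - 1) (a + 1) (by omega) (by omega) (by omega)
      rw [this]
      have he : K - 1 - (9 - (a + 1)) = K - (9 - a) := by ring
      rw [he]
      split_ifs with c1 c2 <;> first
      | (exfalso; omega)
      | (congr 1; ring)
      | rfl

theorem loop_from_one (K : Int) (hK : 0 < K) :
    lllskLoop K 1 =
      (if K ≤ 8 then (0, 1 + K)
       else if (K - 8) % 2 = 0 then (0, 9 + (K - 8) / 2)
       else (-1, 9 + (K - 8 + 1) / 2)) := by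
  have := lllskLoop_phase1 8 K 1 (by norm_num) (by norm_num) hK
  rw [this]; norm_num

-- ===== VERDICT (by name: the statement is the Claim_ definition above) =====
theorem lllsk_spec : Claim_equal_lllsk := by
  intro K _
  unfold Spec_lllsk lllsk lllsk_alt
  by_cases h10 : K < 10
  · simp [h10]
  rw [if_neg h10, if_neg h10]
  by_cases hz : K = 10
  · subst hz
    rw [show (10:Int) - 10 = 0 from by norm_num, lllskLoop]
    norm_num
  have hpos : 0 < K - 10 := by omega
  rw [loop_from_one (K - 10) hpos]
  by_cases hle : K - 10 ≤ 8
  · rw [if_pos hle]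
    rw [if_pos (show ((0:Int), 1 + (K - 10)).1 = 0 from rfl)]
    rw [if_pos (show K - 18 ≤ 0 from by omega)]
    show 1 + (K - 10) = K - 9
    ring
  · rw [if_neg hle]
    rw [show K - 10 - 8 = K - 18 from by ring]
    by_cases hpar : (K - 18) % 2 = 0
    · rw [if_pos hpar]
      rw [if_pos (show ((0:Int), 9 + (K - 18) / 2).1 = 0 from rfl)]
      rw [if_neg (show ¬ K - 18 ≤ 0 from by omega), if_pos hpar]
    · rw [if_neg hpar]
      rw [if_neg (show ¬ ((-1:Int), 9 + (K - 18 + 1) / 2).1 = 0 from by norm_num)]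
      rw [if_neg (show ¬ K - 18 ≤ 0 from by omega), if_neg hpar]
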